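-- pv_equiv track=rewrite | github.com/lizhengping/TelescopeImaging | takephoto.py | relatedDirection
-- ===== SOURCE A (Python) =====
-- def relatedDirection(xNum,yNum,step):
--     xTarget = []
--     yTarget = []
--     x=[]
--     V1 = 0
--     V2 = 0
--
--     for i in range(yNum):
--         yTarget += [i * step] * xNum
--
--     for j in range(xNum):
--         x.append(step*j)
--
--     r = [i for i in x]
--     r.reverse()
--     x2 =x + r
--
--     if (yNum % 2) == 0:
--          xTarget = x2 * int(yNum / 2)
--     if (yNum % 2) == 1:
--          xTarget = x2 * int(yNum / 2) + x
--     # xNonCenter=int(step*(xNum-1)/2)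
--     xNonCenter =0
--     yNonCenter = 0
--     # yNonCenter = int(step * (yNum - 1) / 2)
--     xTarget=[-x+xNonCenter for x in xTarget]
--     yTarget=[-y+yNonCenter for y in yTarget]
--     return xTarget,yTarget
-- ===== SOURCE B (Python) =====
-- def relatedDirection(xNum, yNum, step):
--     xTarget = []
--     yTarget = []
--     cols = [-j * step for j in range(xNum)]
--     for i in range(yNum):
--         xTarget += cols if i % 2 == 0 else cols[::-1]
--         yTarget += [-i * step] * xNum
--     return xTarget, yTarget
-- ===== Notes on version B (the rewrite author's own statement) =====
-- stated objective: simpler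
-- what changed: B emits the snake row by row in one loop over rows with a precomputed negated column list (even rows forward, odd rows reversed), instead of building x, reversing it, replicating the concatenation yNum//2 times with a parity tail, and negating every element afterwards (B also skips A's extra copy r=[i for i in x] and the two full negation passes).
-- intended difference: For negative odd yNum with xNum>0 (a meaningless negative row count), A returns one leftover row of x-coordinates because int(yNum/2) truncates toward zero, while B returns the intended empty ([],[]). — e.g. on relatedDirection(2, -3, 1): A returns ([0, -1], []), B returns ([], [])
import Mathlib
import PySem

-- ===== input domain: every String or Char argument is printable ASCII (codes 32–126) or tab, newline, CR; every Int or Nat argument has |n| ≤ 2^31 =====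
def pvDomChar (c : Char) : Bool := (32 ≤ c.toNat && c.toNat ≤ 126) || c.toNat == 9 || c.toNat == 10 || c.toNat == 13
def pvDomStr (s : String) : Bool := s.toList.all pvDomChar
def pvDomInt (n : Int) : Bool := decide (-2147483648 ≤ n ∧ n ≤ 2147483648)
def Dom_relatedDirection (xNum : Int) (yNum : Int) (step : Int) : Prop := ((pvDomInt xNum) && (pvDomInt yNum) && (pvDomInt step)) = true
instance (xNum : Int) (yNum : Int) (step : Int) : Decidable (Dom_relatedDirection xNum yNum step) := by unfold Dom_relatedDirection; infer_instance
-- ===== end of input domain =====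

-- B builds the snake row by row in one loop (even rows forward, odd rows reversed, already
-- negated), instead of A's build-x / reverse / replicate-x2 yNum//2 times / negate afterwards.

-- ===== PORT A =====
-- int(yNum / 2) truncates toward zero; since |yNum| ≤ 2^31 the float yNum/2 is exact,
-- so it equals Int.tdiv yNum 2.
def relatedDirection (xNum : Int) (yNum : Int) (step : Int) : List Int × List Int :=
  let yTarget : List Int :=
    (PySem.List.pyRange 0 yNum 1).foldl
      (fun acc i => acc ++ PySem.List.pyRepeat [i * step] xNum) []
  let x : List Int :=
    (PySem.List.pyRange 0 xNum 1).foldl (fun acc j => acc ++ [step * j]) []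
  let r := (x.map (fun i => i)).reverse
  let x2 := x ++ r
  let xTarget : List Int := []
  let xTarget := if PySem.Int.mod yNum 2 = 0 then PySem.List.pyRepeat x2 (Int.tdiv yNum 2) else xTarget
  let xTarget := if PySem.Int.mod yNum 2 = 1 then PySem.List.pyRepeat x2 (Int.tdiv yNum 2) ++ x else xTarget
  (xTarget.map (fun x => -x + 0), yTarget.map (fun y => -y + 0))

-- ===== PORT B =====
-- cols[::-1] is ported as List.reverse (exact for a full negative-step-1 slice).
def relatedDirection_alt (xNum : Int) (yNum : Int) (step : Int) : List Int × List Int :=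
  let cols : List Int := (PySem.List.pyRange 0 xNum 1).map (fun j => -j * step)
  (PySem.List.pyRange 0 yNum 1).foldl
    (fun acc i =>
      (acc.1 ++ (if PySem.Int.mod i 2 = 0 then cols else cols.reverse),
       acc.2 ++ PySem.List.pyRepeat [-i * step] xNum))
    ([], [])

-- ===== PRECONDITION & SPEC =====
-- For negative odd yNum with xNum>0 (a meaningless negative row count), A returns one leftover
-- row of x-coordinates because int(yNum/2) truncates toward zero, while B returns the intended
-- empty ([], []).
def D_relatedDirection (xNum : Int) (yNum : Int) (step : Int) : Prop :=
  0 < xNum ∧ yNum < 0 ∧ PySem.Int.mod yNum 2 = 1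
instance (xNum : Int) (yNum : Int) (step : Int) : Decidable (D_relatedDirection xNum yNum step) := by
  unfold D_relatedDirection; infer_instance
def Spec_relatedDirection (xNum : Int) (yNum : Int) (step : Int) (out : List Int × List Int) : Prop :=
  ¬ D_relatedDirection xNum yNum step → out = relatedDirection_alt xNum yNum step
instance (xNum : Int) (yNum : Int) (step : Int) (out : List Int × List Int) : Decidable (Spec_relatedDirection xNum yNum step out) := by
  unfold Spec_relatedDirection; infer_instance
def pvDiffWitness_relatedDirection : Int × Int × Int := (2, -3, 1)
def pvDiffWitnessOut_relatedDirection : (List Int × List Int) × (List Int × List Int) :=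
  (([0, -1], []), ([], []))

-- ===== CLAIM (what is proved, stated in full; the proofs are below) =====
def Claim_unchanged_relatedDirection : Prop := ∀ (xNum : Int) (yNum : Int) (step : Int), Dom_relatedDirection xNum yNum step → Spec_relatedDirection xNum yNum step (relatedDirection xNum yNum step)
def Claim_changed_relatedDirection : Prop := Dom_relatedDirection (pvDiffWitness_relatedDirection.1) (pvDiffWitness_relatedDirection.2.1) (pvDiffWitness_relatedDirection.2.2) ∧ D_relatedDirection (pvDiffWitness_relatedDirection.1) (pvDiffWitness_relatedDirection.2.1) (pvDiffWitness_relatedDirection.2.2) ∧ relatedDirection (pvDiffWitness_relatedDirection.1) (pvDiffWitness_relatedDirection.2.1) (pvDiffWitness_relatedDirection.2.2) = pvDiffWitnessOut_relatedDirection.1 ∧ relatedDirection_alt (pvDiffWitness_relatedDirection.1) (pvDiffWitness_relatedDirection.2.1) (pvDiffWitness_relatedDirection.2.2) = pvDiffWitnessOut_relatedDirection.2 ∧ pvDiffWitnessOut_relatedDirection.1 ≠ pvDiffWitnessOut_relatedDirection.2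
def Claim_exact_relatedDirection : Prop := ∀ (xNum : Int) (yNum : Int) (step : Int), Dom_relatedDirection xNum yNum step → D_relatedDirection xNum yNum step → relatedDirection xNum yNum step ≠ relatedDirection_alt xNum yNum step

-- ===== LEMMAS AND PROOFS =====

theorem pvMod2_even (m : Nat) : PySem.Int.mod ((2*m : Nat) : Int) 2 = 0 := by
  simpa using PySem.Int.mod_natCast (2*m) 2

theorem pvMod2_odd (m : Nat) : PySem.Int.mod ((2*m+1 : Nat) : Int) 2 = 1 := by
  have h := PySem.Int.mod_natCast (2*m+1) 2
  simp at h
  simpa [Nat.mul_add_mod] using h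

theorem pvTdiv_even (m : Nat) : Int.tdiv ((2*m : Nat) : Int) 2 = (m : Int) := by
  rw [Int.tdiv_eq_ediv_of_nonneg (by positivity)]; omega

theorem pvTdiv_odd (m : Nat) : Int.tdiv ((2*m+1 : Nat) : Int) 2 = (m : Int) := by
  rw [Int.tdiv_eq_ediv_of_nonneg (by positivity)]; omega

theorem pvTdiv_nonpos (y : Int) (h : y < 0) : Int.tdiv y 2 ≤ 0 := by
  have h2 : (0:Int) ≤ -y := by omega
  have he : Int.tdiv (-y) 2 = (-y) / 2 := Int.tdiv_eq_ediv_of_nonneg h2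
  have : Int.tdiv y 2 = -(Int.tdiv (-y) 2) := by
    rw [← Int.neg_tdiv, neg_neg]
  rw [this, he]; omega

theorem pvFlatMap_single {α β : Type} (f : α → β) (l : List α) :
    l.flatMap (fun a => [f a]) = l.map f := by
  induction l with
  | nil => simp
  | cons a l ih => simp [ih]

-- the snake over List.range: even rows c, odd rows c.reverse
theorem pvSnake (c : List Int) (m : Nat) :
    (List.range (2*m)).flatMap (fun k : Nat => if PySem.Int.mod (k:Int) 2 = 0 then c else c.reverse)
      = (List.replicate m (c ++ c.reverse)).flatten ∧
    (List.range (2*m+1)).flatMap (fun k : Nat => if PySem.Int.mod (k:Int) 2 = 0 then c else c.reverse)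
      = (List.replicate m (c ++ c.reverse)).flatten ++ c := by
  induction m with
  | zero =>
    constructor
    · simp
    · simp only [Nat.mul_zero, Nat.zero_add, List.range_one, List.flatMap_cons,
        List.flatMap_nil, List.replicate_zero, List.flatten_nil, List.nil_append,
        List.append_nil]
      have : PySem.Int.mod ((0:Nat):Int) 2 = 0 := by decide
      simp [this]
  | succ m ih =>
    have he : (2*(m+1)) = (2*m+1) + 1 := by omega
    have h1 : (List.range (2*(m+1))).flatMap
        (fun k : Nat => if PySem.Int.mod (k:Int) 2 = 0 then c else c.reverse)
        = (List.replicate (m+1) (c ++ c.reverse)).flatten := by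
      rw [he, List.range_succ, List.flatMap_append, ih.2]
      have : PySem.Int.mod ((2*m+1 : Nat):Int) 2 = 1 := pvMod2_odd m
      simp [this, List.replicate_succ' (n := m)]
    refine ⟨h1, ?_⟩
    rw [List.range_succ, List.flatMap_append, h1]
    have : PySem.Int.mod ((2*(m+1) : Nat):Int) 2 = 0 := pvMod2_even (m+1)
    simp [this]

-- canonical form of port B
theorem pvAlt_eq (xNum yNum step : Int) :
    relatedDirection_alt xNum yNum step =
      ((PySem.List.pyRange 0 yNum 1).flatMap
         (fun i => if PySem.Int.mod i 2 = 0
                   then (PySem.List.pyRange 0 xNum 1).map (fun j => -j * step)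
                   else ((PySem.List.pyRange 0 xNum 1).map (fun j => -j * step)).reverse),
       (PySem.List.pyRange 0 yNum 1).flatMap
         (fun i => List.replicate xNum.toNat (-i * step))) := by
  unfold relatedDirection_alt
  rw [PySem.List.foldl_prod_mk
        (f := fun a (i : Int) => a ++ (if PySem.Int.mod i 2 = 0
              then (PySem.List.pyRange 0 xNum 1).map (fun j => -j * step)
              else ((PySem.List.pyRange 0 xNum 1).map (fun j => -j * step)).reverse))
        (g := fun a (i : Int) => a ++ PySem.List.pyRepeat [-i * step] xNum)]
  rw [PySem.List.foldl_append_eq_flatMap, PySem.List.foldl_append_eq_flatMap]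
  simp [PySem.List.pyRepeat_singleton]

-- canonical form of port A (x written as a map, yTarget as a flatMap)
theorem pvA_eq (xNum yNum step : Int) :
    relatedDirection xNum yNum step =
      (((if PySem.Int.mod yNum 2 = 1
          then PySem.List.pyRepeat
                 ((PySem.List.pyRange 0 xNum 1).map (fun j => step * j)
                   ++ ((PySem.List.pyRange 0 xNum 1).map (fun j => step * j)).reverse)
                 (Int.tdiv yNum 2)
               ++ (PySem.List.pyRange 0 xNum 1).map (fun j => step * j)
          else if PySem.Int.mod yNum 2 = 0
          then PySem.List.pyRepeat
                 ((PySem.List.pyRange 0 xNum 1).map (fun j => step * j)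
                   ++ ((PySem.List.pyRange 0 xNum 1).map (fun j => step * j)).reverse)
                 (Int.tdiv yNum 2)
          else []).map (fun t => -t + 0)),
       ((PySem.List.pyRange 0 yNum 1).flatMap
          (fun i => List.replicate xNum.toNat (i * step))).map (fun t => -t + 0)) := by
  unfold relatedDirection
  rw [PySem.List.foldl_append_eq_flatMap, PySem.List.foldl_append_eq_flatMap]
  have hx : (PySem.List.pyRange 0 xNum 1).flatMap (fun j => [step * j])
      = (PySem.List.pyRange 0 xNum 1).map (fun j => step * j) := pvFlatMap_single _ _
  simp only [List.nil_append, hx, List.map_id_fun', id, PySem.List.pyRepeat_singleton]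

-- the y-coordinate lists agree everywhere
theorem pvY_eq (xNum yNum step : Int) :
    ((PySem.List.pyRange 0 yNum 1).flatMap
        (fun i => List.replicate xNum.toNat (i * step))).map (fun t => -t + 0)
      = (PySem.List.pyRange 0 yNum 1).flatMap
          (fun i => List.replicate xNum.toNat (-i * step)) := by
  rw [List.map_flatMap]
  apply List.flatMap_congr
  intro i _
  rw [List.map_replicate]
  congr 1
  ring

-- ===== VERDICT (by name: the statement is the Claim_ definition above) =====
theorem relatedDirection_spec : Claim_unchanged_relatedDirection := by
  intro xNum yNum step _ hnD
  rw [pvA_eq, pvAlt_eq, Prod.mk.injEq]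
  refine ⟨?_, pvY_eq xNum yNum step⟩
  rcases lt_or_ge yNum 0 with hy | hy
  · rw [PySem.List.pyRange_one_eq_nil (a := 0) (b := yNum) (by omega)]
    simp only [List.flatMap_nil]
    rcases PySem.Int.mod_two_eq yNum with h0 | h1
    · have hne : ¬ (PySem.Int.mod yNum 2 = 1) := by rw [h0]; decide
      rw [if_neg hne, if_pos h0]
      have ht : (Int.tdiv yNum 2).toNat = 0 := by
        have := pvTdiv_nonpos yNum hy
        omega
      simp [PySem.List.pyRepeat, ht]
    · have hx0 : xNum ≤ 0 := by
        by_contra hpos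
        exact hnD ⟨by omega, hy, h1⟩
      rw [PySem.List.pyRange_one_eq_nil (a := 0) (b := xNum) (by omega)]
      simp [h1, PySem.List.pyRepeat]
  · obtain ⟨n, rfl⟩ : ∃ n : Nat, yNum = (n : Int) := ⟨yNum.toNat, by omega⟩
    rw [PySem.List.pyRange_zero_natCast, List.flatMap_map]
    rcases Nat.even_or_odd n with he | ho
    · obtain ⟨m, hm⟩ := he
      have hm' : n = 2*m := by omega
      subst hm'
      have h0 := pvMod2_even m
      have hne : ¬ (PySem.Int.mod ((2*m : Nat) : Int) 2 = 1) := by rw [h0]; decide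
      rw [if_neg hne, if_pos h0, pvTdiv_even,
        (pvSnake ((PySem.List.pyRange 0 xNum 1).map (fun j => -j * step)) m).1]
      simp [PySem.List.pyRepeat, List.map_flatten, List.map_replicate, List.map_append,
        List.map_reverse, Function.comp_def, mul_comm]
    · obtain ⟨m, hm⟩ := ho
      subst hm
      have h1 := pvMod2_odd m
      rw [if_pos h1, pvTdiv_odd,
        (pvSnake ((PySem.List.pyRange 0 xNum 1).map (fun j => -j * step)) m).2]
      simp [PySem.List.pyRepeat, List.map_flatten, List.map_replicate, List.map_append,
        List.map_reverse, Function.comp_def, mul_comm]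

theorem relatedDirection_changed : Claim_changed_relatedDirection := by
  unfold Claim_changed_relatedDirection; decide

theorem relatedDirection_tight : Claim_exact_relatedDirection := by
  intro xNum yNum step _ hD heq
  obtain ⟨hx, hy, h1⟩ := hD
  have hlen := congrArg (fun p => p.1.length) heq
  rw [pvA_eq, pvAlt_eq] at hlen
  rw [PySem.List.pyRange_one_eq_nil (a := 0) (b := yNum) (by omega)] at hlen
  simp at hlen
  have h1' : yNum % 2 = 1 := by
    rw [← PySem.Int.mod_eq_emod_of_pos (a := yNum) (by norm_num : (0:Int) < 2)]
    exact h1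
  rw [if_pos h1'] at hlen
  have hl := congrArg List.length hlen
  simp [PySem.List.length_pyRange_one] at hl
  omega
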